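-- pv_equiv track=rewrite | github.com/TheChantingMachman/Terdis | spec/specdb.py | _split_leading_comments
-- ===== SOURCE A (Python) =====
-- def _split_leading_comments(raw_lines):
--     """Split raw lines into (leading_comments, body_lines).
--
--     leading_comments: lines at the top of the file that start with '#'.
--     body_lines: all remaining lines (includes blank separator and entries).
--     """
--     leading_comments = []
--     body_lines = []
--     in_comments = True
--     for line in raw_lines:
--         if in_comments and line.startswith("#"):
--             leading_comments.append(line)
--         else:
--             in_comments = False
--             body_lines.append(line)
--     return leading_comments, body_lines
-- ===== SOURCE B (Python) =====
-- def _split_leading_comments(raw_lines):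
--     """Compute the boundary index, then partition by slicing."""
--     lines = list(raw_lines)
--     n = 0
--     while n < len(lines) and lines[n].startswith("#"):
--         n += 1
--     return lines[:n], lines[n:]
-- ===== Notes on version B (the rewrite author's own statement) =====
-- stated objective: simpler
-- what changed: Replaces the stateful in_comments accumulator loop with a compute-the-boundary-index step followed by two slices.
import Mathlib
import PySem

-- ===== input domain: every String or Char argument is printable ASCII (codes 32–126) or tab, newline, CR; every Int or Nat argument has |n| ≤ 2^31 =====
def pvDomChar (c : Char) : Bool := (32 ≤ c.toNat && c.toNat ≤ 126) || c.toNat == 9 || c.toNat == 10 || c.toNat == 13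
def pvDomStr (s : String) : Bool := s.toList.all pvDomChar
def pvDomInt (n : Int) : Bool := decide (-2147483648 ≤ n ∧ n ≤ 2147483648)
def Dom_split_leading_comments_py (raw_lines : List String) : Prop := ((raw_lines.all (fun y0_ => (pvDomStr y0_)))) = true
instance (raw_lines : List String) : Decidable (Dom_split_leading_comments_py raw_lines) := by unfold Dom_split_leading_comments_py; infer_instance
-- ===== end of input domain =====

-- ===== PORT A =====
-- transliteration of A's loop: state (leading_comments, body_lines, in_comments)
def split_leading_comments_py (raw_lines : List String) : List String × List String :=
  let s := raw_lines.foldl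
    (fun (s : List String × List String × Bool) line =>
      if s.2.2 && PySem.Str.startswith line "#" then
        (s.1 ++ [line], s.2.1, s.2.2)
      else
        (s.1, s.2.1 ++ [line], false))
    ([], [], true)
  (s.1, s.2.1)

-- ===== PORT B =====
-- B: count the leading '#'-lines (the while loop of Source B), then slice
def countLeadHash : List String → Nat
  | [] => 0
  | l :: ls => if PySem.Str.startswith l "#" then countLeadHash ls + 1 else 0

def split_leading_comments_py_alt (raw_lines : List String) : List String × List String :=
  let n := countLeadHash raw_lines
  (raw_lines.take n, raw_lines.drop n)

-- ===== PRECONDITION & SPEC =====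
def Spec_split_leading_comments_py (raw_lines : List String) (out : List String × List String) : Prop := out = split_leading_comments_py_alt raw_lines
instance (raw_lines : List String) (out : List String × List String) : Decidable (Spec_split_leading_comments_py raw_lines out) := by unfold Spec_split_leading_comments_py; infer_instance

-- ===== CLAIM (what is proved, stated in full; the proofs are below) =====
def Claim_equal_split_leading_comments_py : Prop := ∀ (raw_lines : List String), Dom_split_leading_comments_py raw_lines → Spec_split_leading_comments_py raw_lines (split_leading_comments_py raw_lines)

-- ===== LEMMAS AND PROOFS =====

-- ===== VERDICT (by name: the statement is the Claim_ definition above) =====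
-- loop invariant: from state (lc, bl, false) the fold only appends to bl
theorem foldA_false (xs : List String) (lc bl : List String) :
    xs.foldl
      (fun (s : List String × List String × Bool) line =>
        if s.2.2 && PySem.Str.startswith line "#" then
          (s.1 ++ [line], s.2.1, s.2.2)
        else
          (s.1, s.2.1 ++ [line], false))
      (lc, bl, false) = (lc, bl ++ xs, false) := by
  induction xs generalizing bl with
  | nil => simp
  | cons x xs ih =>
    simp only [List.foldl_cons, Bool.false_and, Bool.false_eq_true, if_false]
    rw [ih]
    simp

-- loop invariant: from state (lc, bl, true) the fold splits xs at countLeadHash xs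
theorem foldA_true (xs : List String) (lc bl : List String) :
    (xs.foldl
      (fun (s : List String × List String × Bool) line =>
        if s.2.2 && PySem.Str.startswith line "#" then
          (s.1 ++ [line], s.2.1, s.2.2)
        else
          (s.1, s.2.1 ++ [line], false))
      (lc, bl, true)).1 = lc ++ xs.take (countLeadHash xs) ∧
    (xs.foldl
      (fun (s : List String × List String × Bool) line =>
        if s.2.2 && PySem.Str.startswith line "#" then
          (s.1 ++ [line], s.2.1, s.2.2)
        else
          (s.1, s.2.1 ++ [line], false))
      (lc, bl, true)).2.1 = bl ++ xs.drop (countLeadHash xs) := by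
  induction xs generalizing lc bl with
  | nil => simp [countLeadHash]
  | cons x xs ih =>
    by_cases h : PySem.Str.startswith x "#"
    · obtain ⟨ih1, ih2⟩ := ih (lc ++ [x]) bl
      simp only [List.foldl_cons, Bool.true_and, countLeadHash, if_pos h]
      exact ⟨by rw [ih1]; simp, by rw [ih2]; simp⟩
    · simp only [List.foldl_cons, Bool.true_and, countLeadHash, if_neg h]
      rw [foldA_false]
      simp

theorem split_leading_comments_py_spec : Claim_equal_split_leading_comments_py := by
  intro raw_lines _
  unfold Spec_split_leading_comments_py
  obtain ⟨h1, h2⟩ := foldA_true raw_lines [] []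
  simp only [List.nil_append] at h1 h2
  simp only [split_leading_comments_py, split_leading_comments_py_alt]
  exact Prod.ext h1 h2
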